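-- pv_equiv track=rewrite | github.com/Ericsson/PlantUML-Interactive-Editor | src/plantuml_gui/classes.py | findelsebounds
-- ===== SOURCE A (Python) =====
-- def findelsebounds(lines, if_start):
--     start_else = -1
--     end_else = -1
--     index = if_start
--     inside_else = False
--     parentheses = 0
--
--     level = 0
--     while index < len(lines):  # find index of correct else line
--         line = lines[index]
--         clean_line = line.strip()
--         if (
--             level == 1
--         ):  # if at level 1 its the correct else (level will always start off as 1 since the first line is the if statement were on)
--             if clean_line.startswith("else"):
--                 start_else = index
--                 inside_else = True
--         if clean_line.startswith(
--             "if"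
--         ):  # nested if statement, we need to find two elses.
--             level += 1
--         if level != 1 and clean_line.startswith("else"):
--             level -= 1
--
--         if inside_else:
--             parentheses += clean_line.count("(")
--             parentheses -= clean_line.count(")")
--             if parentheses == 0:
--                 end_else = index
--                 break
--         index += 1
--
--     return start_else, end_else
-- ===== SOURCE B (Python) =====
-- def findelsebounds(lines, if_start):
--     n = len(lines)
--     # Phase 1: one scan collecting every "else" line seen at nesting level 1.
--     elses = []
--     level = 0
--     for idx in range(if_start, n):
--         s = lines[idx].strip()
--         if level == 1 and s.startswith("else"):
--             elses.append(idx)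
--         if s.startswith("if"):
--             level += 1
--         elif level != 1 and s.startswith("else"):
--             level -= 1
--     if not elses:
--         return -1, -1
--     # Phase 2: from the first level-1 else, find where the parenthesis
--     # balance first returns to zero; the matching start is the last
--     # level-1 else at or before that point.
--     bal = 0
--     for j in range(elses[0], n):
--         s = lines[j].strip()
--         bal += s.count("(") - s.count(")")
--         if bal == 0:
--             start = -1
--             for e in elses:
--                 if e <= j:
--                     start = e
--             return start, j
--     return elses[-1], -1
-- ===== Notes on version B (the rewrite author's own statement) =====
-- stated objective: alternative
-- what changed: Replaces A's single interleaved while-loop state machine (level, inside_else, parentheses and break all mixed in one pass) by two separate phases: one scan that collects all level-1 'else' indices, then a paren-balance scan from the first of them that picks the end line and selects the matching start as the last collected else at or before it.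
import Mathlib
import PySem

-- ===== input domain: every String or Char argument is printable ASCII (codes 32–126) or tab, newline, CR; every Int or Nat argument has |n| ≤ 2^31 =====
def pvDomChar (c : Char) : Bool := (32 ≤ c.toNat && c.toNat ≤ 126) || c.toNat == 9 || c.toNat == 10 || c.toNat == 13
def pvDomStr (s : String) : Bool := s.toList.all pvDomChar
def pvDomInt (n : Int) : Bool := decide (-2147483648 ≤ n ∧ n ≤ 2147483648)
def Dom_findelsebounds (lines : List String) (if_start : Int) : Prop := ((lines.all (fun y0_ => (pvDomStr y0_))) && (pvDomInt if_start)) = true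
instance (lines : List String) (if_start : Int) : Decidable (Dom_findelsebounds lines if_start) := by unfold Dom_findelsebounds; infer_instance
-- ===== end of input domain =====

-- B replaces A's single interleaved state machine by a collect-then-select decomposition
-- (same O(n) cost, objective: alternative structure); return values agree on Pre_.

-- ===== PORT A =====
-- literal port of A's while loop: state (start_else, end_else, index, inside_else, parentheses, level)
def findelsebounds_go (lines : List String) (start_else end_else index : Int)
    (inside_else : Bool) (parentheses level : Int) : Int × Int :=
  if _h : index < (lines.length : Int) then
    match PySem.List.pyGet? lines index with
    | none => (start_else, end_else)  -- Python raises IndexError here; such inputs are outside Pre_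
    | some line =>
      let clean_line := PySem.Str.strip line
      let start_else := if level = 1 ∧ PySem.Str.startswith clean_line "else" then index else start_else
      let inside_else := if level = 1 ∧ PySem.Str.startswith clean_line "else" then true else inside_else
      let level := if PySem.Str.startswith clean_line "if" then level + 1 else level
      let level := if level ≠ 1 ∧ PySem.Str.startswith clean_line "else" then level - 1 else level
      if inside_else then
        let parentheses := parentheses + (PySem.Str.count clean_line "(" : Int) - (PySem.Str.count clean_line ")" : Int)
        if parentheses = 0 then (start_else, index)
        else findelsebounds_go lines start_else end_else (index + 1) inside_else parentheses level
      else findelsebounds_go lines start_else end_else (index + 1) inside_else parentheses level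
  else (start_else, end_else)
termination_by ((lines.length : Int) - index).toNat
decreasing_by all_goals omega

def findelsebounds (lines : List String) (if_start : Int) : Int × Int :=
  findelsebounds_go lines (-1) (-1) if_start false 0 0

-- ===== PORT B =====
-- phase 1: collect every "else" line seen at nesting level 1
def altPhase1 (lines : List String) : List Int → Int → List Int → List Int
  | [], _level, elses => elses
  | idx :: rest, level, elses =>
    let s := PySem.Str.strip (PySem.List.pyGetD lines idx "")
    let elses' := if level = 1 ∧ PySem.Str.startswith s "else" then elses ++ [idx] else elses
    let level' := if PySem.Str.startswith s "if" then level + 1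
      else if level ≠ 1 ∧ PySem.Str.startswith s "else" then level - 1 else level
    altPhase1 lines rest level' elses'

-- the inner "for e in elses: if e <= j: start = e" loop
def altSelect (j : Int) (elses : List Int) : Int :=
  elses.foldl (fun start e => if e ≤ j then e else start) (-1)

-- phase 2: paren-balance scan from the first level-1 else
def altPhase2 (lines : List String) (elses : List Int) : List Int → Int → Int × Int
  | [], _bal => ((PySem.List.pyGet? elses (-1)).getD (-1), -1)   -- elses[-1] (elses is nonempty at every call site)
  | j :: rest, bal =>
    let s := PySem.Str.strip (PySem.List.pyGetD lines j "")
    let bal' := bal + (PySem.Str.count s "(" : Int) - (PySem.Str.count s ")" : Int)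
    if bal' = 0 then (altSelect j elses, j)
    else altPhase2 lines elses rest bal'

def findelsebounds_alt (lines : List String) (if_start : Int) : Int × Int :=
  let elses := altPhase1 lines (PySem.List.pyRange if_start (lines.length : Int) 1) 0 []
  match elses with
  | [] => (-1, -1)
  | i0 :: rest => altPhase2 lines (i0 :: rest) (PySem.List.pyRange i0 (lines.length : Int) 1) 0

-- ===== PRECONDITION & SPEC =====
-- Pre_ excludes only if_start < -len(lines), where A raises IndexError (negative-index access past the front).
def Pre_findelsebounds (lines : List String) (if_start : Int) : Prop :=
  -(lines.length : Int) ≤ if_start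
instance (lines : List String) (if_start : Int) : Decidable (Pre_findelsebounds lines if_start) := by unfold Pre_findelsebounds; infer_instance

def pvWitness_findelsebounds : List String × Int := (["if (x)", "else (", ")"], 0)

def Spec_findelsebounds (lines : List String) (if_start : Int) (out : Int × Int) : Prop := out = findelsebounds_alt lines if_start
instance (lines : List String) (if_start : Int) (out : Int × Int) : Decidable (Spec_findelsebounds lines if_start out) := by unfold Spec_findelsebounds; infer_instance

-- ===== CLAIM (what is proved, stated in full; the proofs are below) =====
def Claim_equal_findelsebounds : Prop := ∀ (lines : List String) (if_start : Int), Dom_findelsebounds lines if_start → Pre_findelsebounds lines if_start → Spec_findelsebounds lines if_start (findelsebounds lines if_start)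

-- ===== LEMMAS AND PROOFS =====

-- B from an arbitrary scan start and level (proof-only helper)
def altFrom (lines : List String) (index level : Int) : Int × Int :=
  match altPhase1 lines (PySem.List.pyRange index (lines.length : Int) 1) level [] with
  | [] => (-1, -1)
  | i0 :: rest => altPhase2 lines (i0 :: rest) (PySem.List.pyRange i0 (lines.length : Int) 1) 0

theorem pyGet?_eq_some_pyGetD {α : Type} (xs : List α) (i : Int) (d : α)
    (h1 : -(xs.length : Int) ≤ i) (h2 : i < (xs.length : Int)) :
    PySem.List.pyGet? xs i = some (PySem.List.pyGetD xs i d) := by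
  unfold PySem.List.pyGetD PySem.List.pyGet? PySem.List.pyIdx?
  split_ifs with h3
  · have : i.toNat < xs.length := by omega
    simp [List.getElem?_eq_getElem this]
  · have : xs.length - (-i).toNat < xs.length := by omega
    simp [List.getElem?_eq_getElem this]

theorem not_startswith_else_of_if (s : String)
    (h : PySem.Str.startswith s "if" = true) : PySem.Str.startswith s "else" = false := by
  rw [PySem.Str.startswith_eq] at *
  rw [PySem.Chars.startswith_iff] at h
  by_contra hb
  rw [Bool.not_eq_false, PySem.Chars.startswith_iff] at hb
  obtain ⟨t1, e1⟩ := h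
  obtain ⟨t2, e2⟩ := hb
  rw [← e1] at e2
  have h1 : "if".toList = ['i', 'f'] := rfl
  have h2 : "else".toList = ['e', 'l', 's', 'e'] := rfl
  rw [h1, h2] at e2
  simp at e2

theorem altPhase1_append (lines : List String) (r : List Int) :
    ∀ (level : Int) (E : List Int), altPhase1 lines r level E = E ++ altPhase1 lines r level [] := by
  induction r with
  | nil => intro level E; simp [altPhase1]
  | cons idx rest ih =>
    intro level E
    simp only [altPhase1]
    split_ifs <;>
      first
        | (simp only [List.nil_append]; rw [ih _ (E ++ [idx]), ih _ [idx]]; simp)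
        | exact ih _ E

theorem altPhase1_mem (lines : List String) (r : List Int) :
    ∀ (level : Int) (E : List Int) (e : Int), e ∈ altPhase1 lines r level E → e ∈ E ∨ e ∈ r := by
  induction r with
  | nil => intro level E e h; exact Or.inl (by simpa [altPhase1] using h)
  | cons idx rest ih =>
    intro level E e h
    simp only [altPhase1] at h
    rcases ih _ _ e h with h' | h'
    · split_ifs at h' with hc
      · rcases List.mem_append.1 h' with h'' | h''
        · exact Or.inl h''
        · simp at h''; subst h''; exact Or.inr (List.mem_cons_self)
      · exact Or.inl h'
    · exact Or.inr (List.mem_cons_of_mem _ h')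

theorem select_skip_high (j : Int) (F : List Int) (hF : ∀ e ∈ F, j < e) (a : Int) :
    F.foldl (fun start e => if e ≤ j then e else start) a = a := by
  induction F generalizing a with
  | nil => rfl
  | cons x xs ih =>
    have hx : ¬ x ≤ j := by have := hF x List.mem_cons_self; omega
    simp only [List.foldl_cons, if_neg hx]
    exact ih (fun e he => hF e (List.mem_cons_of_mem _ he)) a

theorem select_all_low (j : Int) (E : List Int) (hE : ∀ e ∈ E, e ≤ j) (a : Int) :
    E.foldl (fun start e => if e ≤ j then e else start) a = E.getLastD a := by
  induction E generalizing a with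
  | nil => rfl
  | cons x xs ih =>
    have hx : x ≤ j := hE x List.mem_cons_self
    simp only [List.foldl_cons, if_pos hx, List.getLastD_cons]
    exact ih (fun e he => hE e (List.mem_cons_of_mem _ he)) x

theorem altSelect_eq_getLastD (j : Int) (E F : List Int)
    (hE : ∀ e ∈ E, e ≤ j) (hF : ∀ e ∈ F, j < e) :
    altSelect j (E ++ F) = E.getLastD (-1) := by
  unfold altSelect
  rw [List.foldl_append, select_skip_high j F hF, select_all_low j E hE]

theorem pyGet?_neg_one_getD (E : List Int) : (PySem.List.pyGet? E (-1)).getD (-1) = E.getLastD (-1) := by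
  cases E with
  | nil => rfl
  | cons x xs =>
    rw [PySem.List.pyGet?_neg_one]
    simp [List.getLastD_eq_getLast?]

theorem level_step (s : String) (level : Int) :
    (if (if PySem.Str.startswith s "if" = true then level + 1 else level) ≠ 1 ∧ PySem.Str.startswith s "else" = true
      then (if PySem.Str.startswith s "if" = true then level + 1 else level) - 1
      else (if PySem.Str.startswith s "if" = true then level + 1 else level))
    = (if PySem.Str.startswith s "if" = true then level + 1
       else if level ≠ 1 ∧ PySem.Str.startswith s "else" = true then level - 1 else level) := by
  by_cases hif : PySem.Str.startswith s "if" = true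
  · have he := not_startswith_else_of_if s hif
    simp only [hif, he]
    simp
  · simp only [Bool.not_eq_true] at hif
    simp only [hif]
    simp

-- the "inside_else" regime: A's remaining loop equals B's phase 2 on the remaining range,
-- where E0 is the set of level-1 elses already recorded and F the ones phase 1 still collects
theorem inside_eq (lines : List String) : ∀ (fuel : Nat) (index level bal : Int) (E0 : List Int),
    ((lines.length : Int) - index).toNat ≤ fuel →
    -(lines.length : Int) ≤ index →
    (∀ e ∈ E0, e < index) →
    findelsebounds_go lines (E0.getLastD (-1)) (-1) index true bal level
      = altPhase2 lines (E0 ++ altPhase1 lines (PySem.List.pyRange index (lines.length : Int) 1) level [])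
          (PySem.List.pyRange index (lines.length : Int) 1) bal := by
  intro fuel
  induction fuel with
  | zero =>
    intro index level bal E0 hf hge hlt
    have hn : (lines.length : Int) ≤ index := by omega
    rw [findelsebounds_go, dif_neg (by omega), PySem.List.pyRange_one_eq_nil hn]
    simp [altPhase1, altPhase2, pyGet?_neg_one_getD]
  | succ fuel ih =>
    intro index level bal E0 hf hge hlt
    by_cases hn : index < (lines.length : Int)
    · rw [PySem.List.pyRange_one_cons hn]
      rw [findelsebounds_go, dif_pos hn, pyGet?_eq_some_pyGetD lines index "" hge hn]
      dsimp only [altPhase1, altPhase2]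
      set s := PySem.Str.strip (PySem.List.pyGetD lines index "") with hs
      simp only [ite_self]
      simp only [if_true]
      rw [level_step]
      set L := (if PySem.Str.startswith s "if" = true then level + 1
        else if level ≠ 1 ∧ PySem.Str.startswith s "else" = true then level - 1 else level) with hL
      set F := altPhase1 lines (PySem.List.pyRange (index + 1) (lines.length : Int) 1) L [] with hF
      have hFmem : ∀ e ∈ F, index < e := by
        intro e he
        rw [hF] at he
        rcases altPhase1_mem lines _ L [] e he with h | h
        · simp at h
        · have := PySem.List.mem_pyRange_one.mp h; omega
      by_cases hc : level = 1 ∧ PySem.Str.startswith s "else" = true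
      · simp only [if_pos hc, List.nil_append]
        rw [altPhase1_append lines _ L [index], ← hF]
        have hlast : (E0 ++ [index]).getLastD (-1) = index := by simp
        by_cases hbal : bal + (PySem.Str.count s "(" : Int) - (PySem.Str.count s ")" : Int) = 0
        · simp only [if_pos hbal]
          have hsel : altSelect index (E0 ++ ([index] ++ F)) = (E0 ++ [index]).getLastD (-1) := by
            rw [← List.append_assoc]
            exact altSelect_eq_getLastD index (E0 ++ [index]) F
              (by intro e he; rcases List.mem_append.1 he with h | h
                  · exact le_of_lt (hlt e h)
                  · simp at h; omega)
              hFmem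
          rw [hsel, hlast]
        · simp only [if_neg hbal]
          have ihres := ih (index + 1) L (bal + (PySem.Str.count s "(" : Int) - (PySem.Str.count s ")" : Int)) (E0 ++ [index])
            (by omega) (by omega)
            (by intro e he; rcases List.mem_append.1 he with h | h
                · exact lt_trans (hlt e h) (by omega)
                · simp at h; omega)
          rw [hlast] at ihres
          rw [ihres, List.append_assoc]
      · simp only [if_neg hc, List.nil_append, ← hF]
        by_cases hbal : bal + (PySem.Str.count s "(" : Int) - (PySem.Str.count s ")" : Int) = 0
        · simp only [if_pos hbal]
          rw [altSelect_eq_getLastD index E0 F (fun e he => le_of_lt (hlt e he)) hFmem]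
        · simp only [if_neg hbal]
          exact ih (index + 1) L (bal + (PySem.Str.count s "(" : Int) - (PySem.Str.count s ")" : Int)) E0
            (by omega) (by omega) (fun e he => lt_trans (hlt e he) (by omega))
    · rw [findelsebounds_go, dif_neg hn, PySem.List.pyRange_one_eq_nil (by omega)]
      simp [altPhase1, altPhase2, pyGet?_neg_one_getD]

-- the "searching" regime: A's remaining loop equals B run from index with the given level
theorem outside_eq (lines : List String) : ∀ (fuel : Nat) (index level : Int),
    ((lines.length : Int) - index).toNat ≤ fuel →
    -(lines.length : Int) ≤ index →
    findelsebounds_go lines (-1) (-1) index false 0 level = altFrom lines index level := by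
  intro fuel
  induction fuel with
  | zero =>
    intro index level hf hge
    have hn : (lines.length : Int) ≤ index := by omega
    rw [findelsebounds_go, dif_neg (by omega)]
    unfold altFrom
    rw [PySem.List.pyRange_one_eq_nil hn]
    rfl
  | succ fuel ih =>
    intro index level hf hge
    by_cases hn : index < (lines.length : Int)
    · rw [findelsebounds_go, dif_pos hn, pyGet?_eq_some_pyGetD lines index "" hge hn]
      unfold altFrom
      rw [PySem.List.pyRange_one_cons hn]
      dsimp only [altPhase1]
      set s := PySem.Str.strip (PySem.List.pyGetD lines index "") with hs
      rw [level_step]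
      set L := (if PySem.Str.startswith s "if" = true then level + 1
        else if level ≠ 1 ∧ PySem.Str.startswith s "else" = true then level - 1 else level) with hL
      set F := altPhase1 lines (PySem.List.pyRange (index + 1) (lines.length : Int) 1) L [] with hF
      have hFmem : ∀ e ∈ F, index < e := by
        intro e he
        rw [hF] at he
        rcases altPhase1_mem lines _ L [] e he with h | h
        · simp at h
        · have := PySem.List.mem_pyRange_one.mp h; omega
      by_cases hc : level = 1 ∧ PySem.Str.startswith s "else" = true
      · simp only [if_pos hc, List.nil_append]
        rw [altPhase1_append lines _ L [index], ← hF]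
        simp only [List.singleton_append]
        rw [PySem.List.pyRange_one_cons hn]
        dsimp only [altPhase2]
        rw [← hs]
        by_cases hbal : (0 : Int) + (PySem.Str.count s "(" : Int) - (PySem.Str.count s ")" : Int) = 0
        · simp only [if_pos hbal]
          have hsel : altSelect index (index :: F) = index := by
            have := altSelect_eq_getLastD index [index] F (by intro e he; simp at he; omega) hFmem
            simpa using this
          rw [hsel]
          simp
        · simp only [if_neg hbal]
          have hin := inside_eq lines fuel (index + 1) L
            ((0 : Int) + (PySem.Str.count s "(" : Int) - (PySem.Str.count s ")" : Int)) [index]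
            (by omega) (by omega) (by intro e he; simp at he; omega)
          rw [← hF] at hin
          simp only [List.getLastD_cons, List.getLastD_nil, List.singleton_append] at hin
          exact hin
      · simp only [if_neg hc, List.nil_append, ← hF]
        rw [ih (index + 1) L (by omega) (by omega)]
        unfold altFrom
        rw [← hF]
        simp
    · rw [findelsebounds_go, dif_neg hn]
      unfold altFrom
      rw [PySem.List.pyRange_one_eq_nil (by omega)]
      rfl

-- ===== VERDICT (by name: the statement is the Claim_ definition above) =====
theorem findelsebounds_spec : Claim_equal_findelsebounds := by
  intro lines if_start _hdom hpre
  unfold Spec_findelsebounds findelsebounds findelsebounds_alt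
  rw [outside_eq lines ((lines.length : Int) - if_start).toNat if_start 0 le_rfl hpre]
  unfold altFrom
  rfl
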